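-- pv_equiv track=rewrite | github.com/arpit456jain/gfg-11-Weeks-Workshop-on-DSA-in-Python | week 3/bit Magic/Number is sparse or not.py | isSparse
-- ===== SOURCE A (Python) =====
-- def isSparse(n):
--     c=0
--     while(n>0):
--         if (n%2 == 0):
--             c=0
--         elif (n%2==1):
--             c=c+1
--         if c>=2:
--             return False
--         n=n//2
--     return True
-- ===== SOURCE B (Python) =====
-- def isSparse(n):
--     # closed-form test: a positive n is sparse iff it has no two adjacent set bits
--     return n <= 0 or (n & (n >> 1)) == 0
-- ===== Notes on version B (the rewrite author's own statement) =====
-- stated objective: idiomatic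
-- what changed: Replaces the digit-by-digit scanning loop with a single closed-form bitwise test of adjacent set bits, guarded so that non-positive inputs keep returning True exactly as A's loop does.
import Mathlib
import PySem

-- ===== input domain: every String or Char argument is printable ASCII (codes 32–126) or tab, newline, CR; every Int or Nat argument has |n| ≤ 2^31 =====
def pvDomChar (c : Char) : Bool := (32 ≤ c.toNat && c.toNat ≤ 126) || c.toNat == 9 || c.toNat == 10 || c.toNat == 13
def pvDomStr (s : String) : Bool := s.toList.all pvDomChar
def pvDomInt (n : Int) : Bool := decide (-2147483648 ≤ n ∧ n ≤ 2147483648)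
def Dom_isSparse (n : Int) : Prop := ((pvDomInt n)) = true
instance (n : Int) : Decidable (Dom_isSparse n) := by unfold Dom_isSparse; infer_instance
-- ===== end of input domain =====

-- B replaces A's bit-scanning while-loop by the closed-form test `n <= 0 or (n & (n >> 1)) == 0` (idiomatic, no loop).

-- ===== PORT A =====
-- the while-loop of A, with state (n, c); returns on c >= 2 or when n <= 0
def isSparseLoop (n : Int) (c : Int) : Bool :=
  if hn : n > 0 then
    let c' : Int := if PySem.Int.mod n 2 = 0 then 0
                    else if PySem.Int.mod n 2 = 1 then c + 1 else c
    if c' ≥ 2 then false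
    else isSparseLoop (PySem.Int.floordiv n 2) c'
  else true
termination_by n.toNat
decreasing_by
  have h2 : PySem.Int.floordiv n 2 = n / 2 := by simp [pysem]
  rw [h2]; omega

def isSparse (n : Int) : Bool := isSparseLoop n 0

-- ===== PORT B =====
def isSparse_alt (n : Int) : Bool :=
  decide (n ≤ 0) || (PySem.Int.band n (n >>> (1 : Nat)) == 0)

-- ===== PRECONDITION & SPEC =====
def Spec_isSparse (n : Int) (out : Bool) : Prop := out = isSparse_alt n
instance (n : Int) (out : Bool) : Decidable (Spec_isSparse n out) := by unfold Spec_isSparse; infer_instance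

-- ===== CLAIM (what is proved, stated in full; the proofs are below) =====
def Claim_equal_isSparse : Prop := ∀ (n : Int), Dom_isSparse n → Spec_isSparse n (isSparse n)

-- ===== LEMMAS AND PROOFS =====

lemma land_eq_zero_iff (a b : Nat) : a &&& b = 0 ↔ ∀ i, ¬(a.testBit i ∧ b.testBit i) := by
  constructor
  · intro h i hi
    have := Nat.testBit_and a b i
    rw [h, Nat.zero_testBit, hi.1, hi.2] at this
    simp at this
  · intro h
    apply Nat.eq_of_testBit_eq
    intro i
    rw [Nat.zero_testBit, Nat.testBit_and]
    by_cases ha : a.testBit i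
    · by_cases hb : b.testBit i
      · exact absurd ⟨ha, hb⟩ (h i)
      · simp [hb]
    · simp [ha]

-- one halving step of the closed-form predicate
lemma step (m : Nat) :
    (m &&& (m >>> 1) = 0) ↔ (¬(m % 2 = 1 ∧ (m / 2) % 2 = 1) ∧ (m / 2 &&& ((m / 2) >>> 1) = 0)) := by
  rw [Nat.shiftRight_one, Nat.shiftRight_one, land_eq_zero_iff, land_eq_zero_iff]
  constructor
  · intro h
    refine ⟨?_, ?_⟩
    · intro hbits
      exact h 0 ⟨by simp [Nat.testBit_zero, hbits.1], by simp [Nat.testBit_zero, hbits.2]⟩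
    · intro i hi
      refine h (i + 1) ⟨?_, ?_⟩
      · rw [Nat.testBit_succ]; exact hi.1
      · rw [Nat.testBit_succ]; exact hi.2
  · rintro ⟨h0, h⟩ i hi
    cases i with
    | zero =>
        apply h0
        obtain ⟨h1, h2⟩ := hi
        rw [Nat.testBit_zero, decide_eq_true_eq] at h1 h2
        exact ⟨h1, h2⟩
    | succ i =>
        obtain ⟨h1, h2⟩ := hi
        rw [Nat.testBit_succ] at h1 h2
        exact h i ⟨h1, h2⟩

lemma mod_cast_pos (n : Int) (hn : 0 < n) : PySem.Int.mod n 2 = ((n.toNat % 2 : Nat) : Int) := by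
  have h : PySem.Int.mod n 2 = n % 2 := by simp [pysem]
  rw [h]; omega

lemma floordiv_cast_pos (n : Int) (hn : 0 < n) :
    PySem.Int.floordiv n 2 = ((n.toNat / 2 : Nat) : Int) := by
  have h : PySem.Int.floordiv n 2 = n / 2 := by simp [pysem]
  rw [h]; omega

-- characterisation of A's loop for the two reachable accumulator values
lemma loop_eq (k : Nat) : ∀ n : Int, n.toNat ≤ k → ∀ c : Int, (c = 0 ∨ c = 1) →
    isSparseLoop n c =
      (if 0 < n ∧ c = 1 ∧ n.toNat % 2 = 1 then false
       else decide (n.toNat &&& (n.toNat >>> 1) = 0)) := by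
  induction k with
  | zero =>
      intro n hk c _
      have hn : ¬ n > 0 := by omega
      have hz : n.toNat = 0 := by omega
      rw [isSparseLoop]
      simp [hn, hz]
  | succ k ih =>
      intro n hk c hc
      by_cases hn : n > 0
      · have hmod := mod_cast_pos n hn
        have hdiv := floordiv_cast_pos n hn
        have hd2 : n / 2 = ((n.toNat / 2 : Nat) : Int) := by omega
        have ht : (((n.toNat / 2 : Nat) : Int)).toNat = n.toNat / 2 := by omega
        have hlt : (((n.toNat / 2 : Nat) : Int)).toNat ≤ k := by omega
        rw [isSparseLoop]
        simp only [hn, dif_pos]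
        by_cases hpar : n.toNat % 2 = 0
        · -- even bit: c reset to 0
          have hm0 : PySem.Int.mod n 2 = 0 := by rw [hmod, hpar]; simp
          rw [if_pos hm0]
          norm_num
          rw [hd2, ih _ hlt 0 (Or.inl rfl)]
          rw [if_neg (by norm_num : ¬ (0 < ((n.toNat / 2 : Nat) : Int) ∧ (0:Int) = 1 ∧ (((n.toNat / 2 : Nat) : Int)).toNat % 2 = 1))]
          rw [ht]
          norm_num [hpar]
          rw [step n.toNat]
          constructor
          · exact fun h => ⟨fun hh => absurd hh.1 (by omega), h⟩
          · exact fun h => h.2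
        · -- odd bit: c incremented
          have hpar1 : n.toNat % 2 = 1 := by omega
          have hm1 : PySem.Int.mod n 2 = 1 := by rw [hmod, hpar1]; simp
          have hm0 : ¬ PySem.Int.mod n 2 = 0 := by rw [hm1]; norm_num
          rw [if_neg hm0, if_pos hm1]
          rcases hc with hc | hc
          · -- c = 0 → c incremented to 1, keep looping
            subst hc
            norm_num
            rw [hd2, ih _ hlt 1 (Or.inr rfl), ht]
            by_cases hodd2 : 0 < n.toNat / 2 ∧ n.toNat / 2 % 2 = 1
            · rw [if_pos ⟨by omega, rfl, hodd2.2⟩]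
              have hne : ¬ (n.toNat &&& (n.toNat >>> 1) = 0) := by
                rw [step]
                intro h
                exact h.1 ⟨hpar1, hodd2.2⟩
              simp [hne]
            · have hcond : ¬ (0 < ((n.toNat / 2 : Nat) : Int) ∧ (1:Int) = 1 ∧ n.toNat / 2 % 2 = 1) := by
                intro h
                exact hodd2 ⟨by omega, h.2.2⟩
              rw [if_neg hcond]
              simp only [decide_eq_decide]
              rw [step n.toNat]
              constructor
              · intro h
                refine ⟨fun hh => hodd2 ⟨?_, hh.2⟩, h⟩
                omega
              · exact fun h => h.2
          · -- c = 1 → c becomes 2, return False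
            subst hc
            rw [if_pos (show (1:Int) + 1 ≥ 2 by omega)]
            rw [if_pos (show True ∧ (1:Int) = 1 ∧ n.toNat % 2 = 1 from ⟨trivial, rfl, hpar1⟩)]
      · have hz : n.toNat = 0 := by omega
        rw [isSparseLoop]
        simp [hn, hz]

lemma band_toNat (m : Nat) :
    PySem.Int.band (↑m) ((↑m : Int) >>> (1 : Nat)) = ((m &&& (m >>> 1) : Nat) : Int) := by
  have h2 : ((m : Int)) >>> (1 : Nat) = ((m >>> 1 : Nat) : Int) := by simp
  rw [h2, PySem.Int.band_natCast]

-- ===== VERDICT (by name: the statement is the Claim_ definition above) =====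
theorem isSparse_spec : Claim_equal_isSparse := by
  intro n _
  unfold Spec_isSparse isSparse isSparse_alt
  by_cases hn : 0 < n
  · obtain ⟨m, rfl⟩ := Int.eq_ofNat_of_zero_le hn.le
    rw [loop_eq (↑m : Int).toNat _ le_rfl 0 (Or.inl rfl)]
    rw [if_neg (by norm_num : ¬ (0 < (↑m : Int) ∧ (0:Int) = 1 ∧ (↑m : Int).toNat % 2 = 1))]
    have hle : ¬ ((m : Int) ≤ 0) := by omega
    rw [band_toNat]
    by_cases h : m &&& (m >>> 1) = 0
    · simp [h]
    · simp [h]; omega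
  · rw [loop_eq n.toNat _ le_rfl 0 (Or.inl rfl)]
    rw [if_neg (fun h => absurd h.1 hn)]
    have hz : n.toNat = 0 := by omega
    have hle : n ≤ 0 := by omega
    simp [hz, hle]
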